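-- pv_equiv track=rewrite | github.com/skyrocketOoO/utility | template/find_uncyclic_vertices.py | find_uncyclic_vertices_topo
-- ===== SOURCE A (Python) =====
-- from collections import defaultdict
-- from typing import List
--
-- def find_uncyclic_vertices_topo(graph: List[List[int]]) -> List[int]:
--     class Graph:
--         def __init__(self, vertices):
--             self.graph = defaultdict(list)
--             self.V = vertices
--             self.in_deg = [0] * vertices
--
--         def addEdge(self, u, v):
--             self.graph[u].append(v)
--             self.in_deg[v] += 1
--
--         # if the vertex is in cyclic, it will not add into res
--         def topologicalSort(self):
--             q = []
--             for i in range(self.V):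
--                 if self.in_deg[i] == 0:
--                     q.append(i)
--
--             res = []
--             while q:
--                 i = q.pop(0)
--                 res.append(i)
--                 for j in self.graph[i]:
--                     self.in_deg[j] -= 1
--                     if self.in_deg[j] == 0:
--                         q.append(j)
--
--             return res
--
--     n = len(graph)
--     g = Graph(n)
--     for v in range(n):
--         for u in graph[v]:
--             g.addEdge(u, v)
--     return sorted(g.topologicalSort())
-- ===== SOURCE B (Python) =====
-- def find_uncyclic_vertices_topo(graph):
--     n = len(graph)
--     # graph[v] lists the predecessors of v; v is outside every cycle exactly when
--     # it is in the least set closed under "all predecessors already in the set".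
--     # Chaotic (Gauss-Seidel) fixed-point iteration: sweep all vertices, marking a
--     # vertex once all its predecessors are marked, until a sweep changes nothing.
--     # No queue, no indegree counters, and the result comes out already sorted.
--     ok = [False] * n
--     changed = True
--     while changed:
--         changed = False
--         for v in range(n):
--             if not ok[v] and all(0 <= u < n and ok[u] for u in graph[v]):
--                 ok[v] = True
--                 changed = True
--     return [v for v in range(n) if ok[v]]
-- ===== Notes on version B (the rewrite author's own statement) =====
-- stated objective: alternative
-- what changed: Replaces A's Kahn worklist peeling (reversed-edge defaultdict, indegree counters, FIFO queue, final sort) with a chaotic Gauss-Seidel fixed-point iteration: repeated sweeps over all vertices marking a vertex once all its predecessors are marked, until a sweep changes nothing; the marked set is the same acyclic set and the ascending sweep makes the output sorted with no queue, no indegrees and no sort call.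
import Mathlib
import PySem

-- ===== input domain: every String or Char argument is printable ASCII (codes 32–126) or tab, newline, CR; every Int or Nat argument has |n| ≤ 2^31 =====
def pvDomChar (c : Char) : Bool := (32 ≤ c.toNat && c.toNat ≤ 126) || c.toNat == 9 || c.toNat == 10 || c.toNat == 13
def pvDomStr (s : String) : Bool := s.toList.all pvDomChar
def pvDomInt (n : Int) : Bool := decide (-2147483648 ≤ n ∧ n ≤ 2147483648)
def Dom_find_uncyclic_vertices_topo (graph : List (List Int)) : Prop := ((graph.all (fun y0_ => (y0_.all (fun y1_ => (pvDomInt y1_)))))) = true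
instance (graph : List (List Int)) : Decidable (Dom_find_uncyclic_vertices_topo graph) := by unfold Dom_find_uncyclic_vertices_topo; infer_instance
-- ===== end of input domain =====

-- B replaces A's Kahn worklist peeling (reversed-edge dict, indegree counters, FIFO queue, final
-- sort) with a chaotic Gauss-Seidel fixed-point iteration: sweep all vertices, marking a vertex
-- once all its predecessors are marked, until a sweep changes nothing (objective: alternative).

-- ===== PORT A =====
-- while q: i = q.pop(0); res.append(i); for j in graph[i]: in_deg[j] -= 1; if == 0: q.append(j)
-- fuel: each vertex enters q at most once, so graph.length iterations always drain q (proved below)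
def pvTopoLoopA (adj : PySem.Dict Int (List Int)) : Nat → List Int → List Int → List Int → List Int
  | _, [], _, res => res
  | 0, _ :: _, _, res => res
  | fuel + 1, i :: t, indeg, res =>
    let st := (adj.getD i []).foldl
      (fun (p : List Int × List Int) j =>
        let d := PySem.List.pySetD p.1 j (PySem.List.pyGetD p.1 j 0 - 1)
        if PySem.List.pyGetD d j 0 = 0 then (d, p.2 ++ [j]) else (d, p.2))
      (indeg, t)
    pvTopoLoopA adj fuel st.2 st.1 (res ++ [i])

def find_uncyclic_vertices_topo (graph : List (List Int)) : List Int :=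
  let n : Int := (graph.length : Int)
  -- for v in range(n): for u in graph[v]: g.addEdge(u, v)  (graph[u].append(v); in_deg[v] += 1)
  let built : PySem.Dict Int (List Int) × List Int :=
    (PySem.List.pyRange 0 n 1).foldl
      (fun st v =>
        (PySem.List.pyGetD graph v []).foldl
          (fun (st : PySem.Dict Int (List Int) × List Int) u =>
            (st.1.modify u [] (fun l => l ++ [v]),
             PySem.List.pySetD st.2 v (PySem.List.pyGetD st.2 v 0 + 1)))
          st)
      (PySem.Dict.empty, List.replicate graph.length (0 : Int))
  -- q = [i for i in range(V) if in_deg[i] == 0]  (built with an append loop, as in A)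
  let q0 : List Int :=
    (PySem.List.pyRange 0 n 1).foldl
      (fun q i => if PySem.List.pyGetD built.2 i 0 = 0 then q ++ [i] else q) []
  PySem.List.sorted (pvTopoLoopA built.1 graph.length q0 built.2 []) (fun x => x) false

-- ===== PORT B =====
-- not ok[v] and all(0 <= u < n and ok[u] for u in graph[v])
def pvCondB (graph : List (List Int)) (n : Int) (s : List Bool) (v : Int) : Bool :=
  !(PySem.List.pyGetD s v false) &&
    ((PySem.List.pyGetD graph v []).all fun u =>
      decide (0 ≤ u ∧ u < n) && PySem.List.pyGetD s u false)

-- one step of the inner 'for v in range(n)' sweep: mark v, record the change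
def pvStepB (graph : List (List Int)) (n : Int) (p : List Bool × Bool) (v : Int) :
    List Bool × Bool :=
  if pvCondB graph n p.1 v then (PySem.List.pySetD p.1 v true, true) else p

-- one full sweep: changed = False; for v in range(n): …
def pvSweepB (graph : List (List Int)) (n : Int) (ok : List Bool) : List Bool × Bool :=
  (PySem.List.pyRange 0 n 1).foldl (pvStepB graph n) (ok, false)

-- while changed: …  (fuel: every changed sweep marks a new vertex, so n+1 sweeps suffice, proved below)
def pvFixLoop (graph : List (List Int)) (n : Int) : Nat → List Bool → List Bool
  | 0, ok => ok
  | fuel + 1, ok =>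
    let p := pvSweepB graph n ok
    if p.2 then pvFixLoop graph n fuel p.1 else p.1

def find_uncyclic_vertices_topo_alt (graph : List (List Int)) : List Int :=
  let n : Int := (graph.length : Int)
  let ok := pvFixLoop graph n (graph.length + 1) (List.replicate graph.length false)
  -- return [v for v in range(n) if ok[v]]
  (PySem.List.pyRange 0 n 1).foldl
    (fun acc v => if PySem.List.pyGetD ok v false then acc ++ [v] else acc) []

-- ===== PRECONDITION & SPEC =====
def Spec_find_uncyclic_vertices_topo (graph : List (List Int)) (out : List Int) : Prop := out = find_uncyclic_vertices_topo_alt graph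
instance (graph : List (List Int)) (out : List Int) : Decidable (Spec_find_uncyclic_vertices_topo graph out) := by unfold Spec_find_uncyclic_vertices_topo; infer_instance

-- ===== CLAIM (what is proved, stated in full; the proofs are below) =====
def Claim_equal_find_uncyclic_vertices_topo : Prop := ∀ (graph : List (List Int)), Dom_find_uncyclic_vertices_topo graph → Spec_find_uncyclic_vertices_topo graph (find_uncyclic_vertices_topo graph)

-- ===== LEMMAS AND PROOFS =====

def pvPreds (graph : List (List Int)) (v : Int) : List Int := graph.getD v.toNat []
def pvRemdeg (graph : List (List Int)) (S : List Int) (v : Int) : Int :=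
  (((pvPreds graph v).countP (fun u => decide (u ∉ S)) : Nat) : Int)

theorem pvRemdeg_nonneg (graph S v) : 0 ≤ pvRemdeg graph S v := Int.natCast_nonneg _

theorem pvRemdeg_zero_iff (graph S v) :
    pvRemdeg graph S v = 0 ↔ ∀ u ∈ pvPreds graph v, u ∈ S := by
  unfold pvRemdeg
  rw [Int.natCast_eq_zero, List.countP_eq_zero]
  simp

theorem pvCountP_append_singleton (l S : List Int) (i : Int) (hi : i ∉ S) :
    (l.countP (fun u => decide (u ∉ S)) : Int)
      = (l.countP (fun u => decide (u ∉ S ++ [i])) : Int) + (l.count i : Int) := by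
  induction l with
  | nil => simp
  | cons a rest ih =>
    simp only [List.countP_cons, List.count_cons, decide_eq_true_eq, beq_iff_eq]
    split_ifs <;>
      first
        | (push_cast at ih ⊢; omega)
        | (exfalso; simp_all)

theorem pvRemdeg_snoc (graph : List (List Int)) (S : List Int) (i v : Int) (hi : i ∉ S) :
    pvRemdeg graph (S ++ [i]) v = pvRemdeg graph S v - ((pvPreds graph v).count i : Int) := by
  unfold pvRemdeg
  rw [pvCountP_append_singleton _ S i hi]
  ring

theorem pvLenBound (L : List Int) (n : Nat) (hnd : L.Nodup)
    (hr : ∀ v ∈ L, 0 ≤ v ∧ v < (n : Int)) : L.length ≤ n := by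
  classical
  have h1 : L.toFinset.card = L.length := List.toFinset_card_of_nodup hnd
  have h2 : L.toFinset ⊆ Finset.Ico (0 : Int) n := by
    intro x hx
    rw [List.mem_toFinset] at hx
    exact Finset.mem_Ico.mpr ⟨(hr x hx).1, (hr x hx).2⟩
  have := Finset.card_le_card h2
  rw [h1, Int.card_Ico] at this
  omega

theorem pvStep_eq (indeg acc : List Int) (a : Int) (h0 : 0 ≤ a) (hlen : a.toNat < indeg.length) :
    (let d := PySem.List.pySetD (indeg, acc).1 a (PySem.List.pyGetD (indeg, acc).1 a 0 - 1);
       if PySem.List.pyGetD d a 0 = 0 then (d, (indeg, acc).2 ++ [a]) else (d, (indeg, acc).2))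
    = ((indeg.set a.toNat (indeg.getD a.toNat 0 - 1),
       if indeg.getD a.toNat 0 = 1 then acc ++ [a] else acc) : List Int × List Int) := by
  simp only [PySem.List.pySetD_of_nonneg _ _ h0, PySem.List.pyGetD_of_nonneg _ _ h0]
  have hset : (indeg.set a.toNat (indeg.getD a.toNat 0 - 1)).getD a.toNat 0
      = indeg.getD a.toNat 0 - 1 := by
    rw [List.getD_eq_getElem _ _ (by simpa using hlen)]
    simp
  rw [hset]
  split_ifs with h1 h2 h3 <;> first | rfl | omega

theorem pvDecFold (as indeg acc : List Int)
    (has : ∀ a ∈ as, 0 ≤ a ∧ a.toNat < indeg.length) :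
    (as.foldl (fun (p : List Int × List Int) j =>
        let d := PySem.List.pySetD p.1 j (PySem.List.pyGetD p.1 j 0 - 1)
        if PySem.List.pyGetD d j 0 = 0 then (d, p.2 ++ [j]) else (d, p.2)) (indeg, acc)).1.length
        = indeg.length ∧
    (∀ k : Nat, k < indeg.length →
      (as.foldl (fun (p : List Int × List Int) j =>
        let d := PySem.List.pySetD p.1 j (PySem.List.pyGetD p.1 j 0 - 1)
        if PySem.List.pyGetD d j 0 = 0 then (d, p.2 ++ [j]) else (d, p.2)) (indeg, acc)).1.getD k 0
        = indeg.getD k 0 - (as.count (k : Int) : Int)) ∧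
    (∀ j : Int,
      (((as.foldl (fun (p : List Int × List Int) j =>
        let d := PySem.List.pySetD p.1 j (PySem.List.pyGetD p.1 j 0 - 1)
        if PySem.List.pyGetD d j 0 = 0 then (d, p.2 ++ [j]) else (d, p.2)) (indeg, acc)).2.count j : Nat) : Int)
        = (acc.count j : Int) +
          (if 0 ≤ j ∧ j.toNat < indeg.length ∧ 1 ≤ indeg.getD j.toNat 0
              ∧ indeg.getD j.toNat 0 ≤ (as.count j : Int) then 1 else 0)) := by
  induction as generalizing indeg acc with
  | nil =>
    refine ⟨rfl, fun k _ => by simp, fun j => ?_⟩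
    rw [if_neg (by simp; omega)]
    simp
  | cons a rest ih =>
    obtain ⟨ha0, halen⟩ := has a List.mem_cons_self
    simp only [List.foldl_cons]
    rw [pvStep_eq indeg acc a ha0 halen]
    have hlen' : (indeg.set a.toNat (indeg.getD a.toNat 0 - 1)).length = indeg.length := by simp
    obtain ⟨IH1, IH2, IH3⟩ := ih (indeg.set a.toNat (indeg.getD a.toNat 0 - 1))
      (if indeg.getD a.toNat 0 = 1 then acc ++ [a] else acc)
      (by intro b hb; have := has b (List.mem_cons_of_mem _ hb); omega)
    have hgetD : ∀ k : Nat, k < indeg.length →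
        (indeg.set a.toNat (indeg.getD a.toNat 0 - 1)).getD k 0
        = if k = a.toNat then indeg.getD a.toNat 0 - 1 else indeg.getD k 0 := by
      intro k hk
      by_cases hka : k = a.toNat
      · subst hka
        rw [if_pos rfl, List.getD_eq_getElem _ _ (by omega)]
        simp
      · rw [if_neg hka, List.getD_eq_getElem _ _ (by omega), List.getD_eq_getElem _ _ hk,
          List.getElem_set_ne (by omega)]
    refine ⟨by rw [IH1, hlen'], fun k hk => ?_, fun j => ?_⟩
    · rw [IH2 k (by omega), hgetD k hk]
      by_cases hka : (k : Int) = a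
      · have hkeq : k = a.toNat := by omega
        subst hkeq
        rw [show ((a.toNat : Nat) : Int) = a from by omega, List.count_cons_self, if_pos rfl]
        push_cast; omega
      · rw [if_neg (by omega), List.count_cons_of_ne (by exact fun h => hka h.symm)]
    · rw [IH3 j]
      by_cases hja : j = a
      · rw [hja]
        have hsa : (indeg.set a.toNat (indeg.getD a.toNat 0 - 1)).getD a.toNat 0
            = indeg.getD a.toNat 0 - 1 := by rw [hgetD a.toNat halen, if_pos rfl]
        rw [List.count_cons_self]
        have hiff : (0 ≤ a ∧ a.toNat < (indeg.set a.toNat (indeg.getD a.toNat 0 - 1)).length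
            ∧ 1 ≤ (indeg.set a.toNat (indeg.getD a.toNat 0 - 1)).getD a.toNat 0
            ∧ (indeg.set a.toNat (indeg.getD a.toNat 0 - 1)).getD a.toNat 0 ≤ (rest.count a : Int))
            ↔ (2 ≤ indeg.getD a.toNat 0 ∧ indeg.getD a.toNat 0 ≤ ((rest.count a + 1 : Nat) : Int)) := by
          rw [hsa, hlen']
          constructor
          · rintro ⟨-, -, x3, x4⟩; exact ⟨by omega, by push_cast at x4 ⊢; omega⟩
          · rintro ⟨x3, x4⟩; exact ⟨ha0, halen, by omega, by push_cast at x4 ⊢; omega⟩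
        by_cases h1 : indeg.getD a.toNat 0 = 1
        · rw [if_pos h1, if_neg (by rw [hiff]; omega),
            if_pos (⟨ha0, halen, by omega, by push_cast; omega⟩ :
              0 ≤ a ∧ a.toNat < indeg.length ∧ 1 ≤ indeg.getD a.toNat 0
              ∧ indeg.getD a.toNat 0 ≤ ((rest.count a + 1 : Nat) : Int))]
          simp [List.count_append]
        · rw [if_neg h1]
          by_cases hA : 2 ≤ indeg.getD a.toNat 0
              ∧ indeg.getD a.toNat 0 ≤ ((rest.count a + 1 : Nat) : Int)
          · rw [if_pos (hiff.mpr hA), if_pos ⟨ha0, halen, by omega, hA.2⟩]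
          · rw [if_neg (fun hc => hA (hiff.mp hc)),
              if_neg (by rintro ⟨-, -, x3, x4⟩; exact hA ⟨by omega, x4⟩)]
      · have hacc : ((if indeg.getD a.toNat 0 = 1 then acc ++ [a] else acc).count j : Int)
            = (acc.count j : Int) := by
          split_ifs <;> simp [List.count_append, Ne.symm hja]
        rw [hacc, List.count_cons_of_ne (by exact fun h => hja h.symm)]
        by_cases hj0 : 0 ≤ j ∧ j.toNat < indeg.length
        · have hsame : (indeg.set a.toNat (indeg.getD a.toNat 0 - 1)).getD j.toNat 0
              = indeg.getD j.toNat 0 := by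
            rw [hgetD j.toNat hj0.2, if_neg (by omega)]
          rw [hlen', hsame]
        · rw [if_neg (by rw [hlen']; tauto), if_neg (by tauto)]

def pvInv (graph : List (List Int)) (q indeg res : List Int) : Prop :=
  (res ++ q).Nodup ∧
  (∀ v ∈ res ++ q, 0 ≤ v ∧ v < (graph.length : Int)) ∧
  indeg.length = graph.length ∧
  (∀ k : Nat, k < graph.length → indeg.getD k 0 = pvRemdeg graph res (k : Int)) ∧
  (∀ v : Int, 0 ≤ v → v < (graph.length : Int) →
      (pvRemdeg graph res v = 0 ↔ v ∈ res ∨ v ∈ q)) ∧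
  (∀ l1 v l2, res = l1 ++ v :: l2 → ∀ u ∈ pvPreds graph v, u ∈ l1)

def pvAdjOk (graph : List (List Int)) (adjOf : Int → List Int) : Prop :=
  ∀ i : Int, 0 ≤ i → i < (graph.length : Int) →
    (∀ a ∈ adjOf i, 0 ≤ a ∧ a < (graph.length : Int)) ∧
    (∀ k : Int, 0 ≤ k → k < (graph.length : Int) →
        ((adjOf i).count k : Int) = ((pvPreds graph k).count i : Int))

theorem pvStepInv (graph : List (List Int)) (adjOf : Int → List Int)
    (hadj : pvAdjOk graph adjOf) (i : Int) (t indeg res : List Int)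
    (hinv : pvInv graph (i :: t) indeg res) :
    pvInv graph
      ((adjOf i).foldl (fun (p : List Int × List Int) j =>
        let d := PySem.List.pySetD p.1 j (PySem.List.pyGetD p.1 j 0 - 1)
        if PySem.List.pyGetD d j 0 = 0 then (d, p.2 ++ [j]) else (d, p.2)) (indeg, t)).2
      ((adjOf i).foldl (fun (p : List Int × List Int) j =>
        let d := PySem.List.pySetD p.1 j (PySem.List.pyGetD p.1 j 0 - 1)
        if PySem.List.pyGetD d j 0 = 0 then (d, p.2 ++ [j]) else (d, p.2)) (indeg, t)).1
      (res ++ [i]) := by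
  obtain ⟨hnd, hrange, hlen, hdeg, hiff, hpre⟩ := hinv
  have hi : 0 ≤ i ∧ i < (graph.length : Int) :=
    hrange i (by simp)
  obtain ⟨hadjr, hadjc⟩ := hadj i hi.1 hi.2
  have has : ∀ a ∈ adjOf i, 0 ≤ a ∧ a.toNat < indeg.length := by
    intro a ha; have := hadjr a ha; omega
  obtain ⟨F1, F2, F3⟩ := pvDecFold (adjOf i) indeg t has
  have hinr : i ∉ res := by
    intro hc
    exact (List.disjoint_of_nodup_append hnd) hc (by simp)
  have hri : pvRemdeg graph res i = 0 := (hiff i hi.1 hi.2).mpr (Or.inr (by simp))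
  have hupd : ∀ v : Int, pvRemdeg graph (res ++ [i]) v
      = pvRemdeg graph res v - ((pvPreds graph v).count i : Int) :=
    fun v => pvRemdeg_snoc graph res i v hinr
  have hcnt_old : ∀ x : Int, (res.count x) + ((i :: t).count x) ≤ 1 := by
    intro x
    have := List.nodup_iff_count_le_one.mp hnd x
    rwa [List.count_append] at this
  have hcond : ∀ v : Int, 0 ≤ v → v < (graph.length : Int) →
      ((0 ≤ v ∧ v.toNat < indeg.length ∧ 1 ≤ indeg.getD v.toNat 0
          ∧ indeg.getD v.toNat 0 ≤ ((adjOf i).count v : Int))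
        ↔ (1 ≤ pvRemdeg graph res v ∧ pvRemdeg graph (res ++ [i]) v = 0)) := by
    intro v h0 h1
    have hc : ((adjOf i).count v : Int) = ((pvPreds graph v).count i : Int) := hadjc v h0 h1
    have hd : indeg.getD v.toNat 0 = pvRemdeg graph res v := by
      have := hdeg v.toNat (by omega)
      rwa [Int.toNat_of_nonneg h0] at this
    rw [hc, hd, hupd v]
    have hnn := pvRemdeg_nonneg graph (res ++ [i]) v
    rw [hupd v] at hnn
    constructor
    · rintro ⟨-, -, x3, x4⟩; exact ⟨x3, by omega⟩
    · rintro ⟨x3, x4⟩; exact ⟨h0, by omega, x3, by omega⟩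
  have hfresh : ∀ v : Int, 0 ≤ v → v < (graph.length : Int) →
      1 ≤ pvRemdeg graph res v → v ∉ res ∧ v ≠ i ∧ v ∉ t := by
    intro v h0 h1 hge
    have : ¬ (v ∈ res ∨ v ∈ i :: t) := by
      intro hc
      have := (hiff v h0 h1).mpr hc
      omega
    push Not at this
    have h2 := this.2
    simp only [List.mem_cons] at h2
    push Not at h2
    exact ⟨this.1, h2.1, h2.2⟩
  refine ⟨?_, ?_, by rw [F1, hlen], ?_, ?_, ?_⟩
  · rw [List.nodup_iff_count_le_one]
    intro x
    rw [List.count_append, List.count_append]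
    have hF := F3 x
    have hold := hcnt_old x
    rw [List.count_cons] at hold
    by_cases hcx : 0 ≤ x ∧ x.toNat < indeg.length ∧ 1 ≤ indeg.getD x.toNat 0
        ∧ indeg.getD x.toNat 0 ≤ ((adjOf i).count x : Int)
    · have hx1 : x < (graph.length : Int) := by
        have := hcx.2.1; rw [hlen] at this; omega
      have := (hcond x hcx.1 hx1).mp hcx
      obtain ⟨hxr, hxi, hxt⟩ := hfresh x hcx.1 hx1 this.1
      rw [if_pos hcx] at hF
      have hr0 : res.count x = 0 := List.count_eq_zero.mpr hxr
      have hi0 : List.count x [i] = 0 := List.count_eq_zero.mpr (by simp [hxi])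
      have ht0 : t.count x = 0 := List.count_eq_zero.mpr hxt
      omega
    · rw [if_neg hcx] at hF
      by_cases hxi2 : x = i
      · subst hxi2
        simp only [beq_self_eq_true, if_true] at hold
        have : List.count x [x] = 1 := by simp
        omega
      · rw [if_neg (by simp [Ne.symm hxi2])] at hold
        have : List.count x [i] = 0 := List.count_eq_zero.mpr (by simp [hxi2])
        omega
  · intro v hv
    rcases List.mem_append.mp hv with h | h
    · rcases List.mem_append.mp h with h' | h'
      · exact hrange v (by simp [h'])
      · simp only [List.mem_singleton] at h'
        subst h'; exact hi
    · have hc := F3 v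
      have hvp : 0 < ((adjOf i).foldl (fun (p : List Int × List Int) j =>
          let d := PySem.List.pySetD p.1 j (PySem.List.pyGetD p.1 j 0 - 1)
          if PySem.List.pyGetD d j 0 = 0 then (d, p.2 ++ [j]) else (d, p.2)) (indeg, t)).2.count v :=
        List.count_pos_iff.mpr h
      by_cases hcx : 0 ≤ v ∧ v.toNat < indeg.length ∧ 1 ≤ indeg.getD v.toNat 0
          ∧ indeg.getD v.toNat 0 ≤ ((adjOf i).count v : Int)
      · refine ⟨hcx.1, ?_⟩
        have := hcx.2.1; rw [hlen] at this; omega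
      · rw [if_neg hcx] at hc
        have : v ∈ t := List.count_pos_iff.mp (by omega)
        exact hrange v (by simp [this])
  · intro k hk
    rw [F2 k (by omega)]
    have hd := hdeg k hk
    have hc : (((adjOf i).count (k : Int)) : Int) = ((pvPreds graph (k : Int)).count i : Int) :=
      hadjc k (by omega) (by omega)
    rw [hd, hc, ← hupd k]
  · intro v h0 h1
    have hF := F3 v
    have hd : indeg.getD v.toNat 0 = pvRemdeg graph res v := by
      have := hdeg v.toNat (by omega)
      rwa [Int.toNat_of_nonneg h0] at this
    have hnn := pvRemdeg_nonneg graph res v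
    have hnn' := pvRemdeg_nonneg graph (res ++ [i]) v
    have hcnt : ((pvPreds graph v).count i : Int) = ((adjOf i).count v : Int) :=
      (hadjc v h0 h1).symm
    constructor
    · intro hz
      by_cases hold : pvRemdeg graph res v = 0
      · rcases (hiff v h0 h1).mp hold with h | h
        · exact Or.inl (by simp [h])
        · rcases List.mem_cons.mp h with h' | h'
          · exact Or.inl (by simp [h'])
          · right
            have ht : 0 < t.count v := List.count_pos_iff.mpr h'
            rw [← List.count_pos_iff]
            split_ifs at hF <;> omega
      · right
        have hcx : 0 ≤ v ∧ v.toNat < indeg.length ∧ 1 ≤ indeg.getD v.toNat 0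
            ∧ indeg.getD v.toNat 0 ≤ ((adjOf i).count v : Int) :=
          (hcond v h0 h1).mpr ⟨by omega, hz⟩
        rw [if_pos hcx] at hF
        rw [← List.count_pos_iff]
        omega
    · intro hm
      rcases hm with h | h
      · rcases List.mem_append.mp h with h' | h'
        · have hold : pvRemdeg graph res v = 0 := (hiff v h0 h1).mpr (Or.inl h')
          rw [hupd v] at hnn' ⊢
          omega
        · simp only [List.mem_singleton] at h'
          subst h'
          rw [hupd v] at hnn' ⊢
          omega
      · have hvp : 0 < ((adjOf i).foldl (fun (p : List Int × List Int) j =>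
            let d := PySem.List.pySetD p.1 j (PySem.List.pyGetD p.1 j 0 - 1)
            if PySem.List.pyGetD d j 0 = 0 then (d, p.2 ++ [j]) else (d, p.2)) (indeg, t)).2.count v :=
          List.count_pos_iff.mpr h
        by_cases hcx : 0 ≤ v ∧ v.toNat < indeg.length ∧ 1 ≤ indeg.getD v.toNat 0
            ∧ indeg.getD v.toNat 0 ≤ ((adjOf i).count v : Int)
        · exact ((hcond v h0 h1).mp hcx).2
        · rw [if_neg hcx] at hF
          have hvt : v ∈ t := List.count_pos_iff.mp (by omega)
          have hold : pvRemdeg graph res v = 0 :=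
            (hiff v h0 h1).mpr (Or.inr (by simp [hvt]))
          rw [hupd v] at hnn' ⊢
          omega
  · intro l1 v l2 heq u hu
    rcases List.eq_nil_or_concat l2 with h2 | ⟨ys, y, h2⟩
    · subst h2
      have : res = l1 ∧ [i] = [v] := List.append_inj' (by simpa using heq) rfl
      obtain ⟨he1, he2⟩ := this
      have hvi : v = i := by simpa using he2.symm
      subst hvi he1
      have := (pvRemdeg_zero_iff graph res v).mp hri
      exact this u hu
    · subst h2
      have heq' : res ++ [i] = (l1 ++ v :: ys) ++ [y] := by
        rw [heq]; simp
      have : res = l1 ++ v :: ys ∧ [i] = [y] := List.append_inj' heq' rfl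
      exact hpre l1 v ys this.1 u hu

def pvGood (graph : List (List Int)) (L : List Int) : Prop :=
  L.Nodup ∧ (∀ v ∈ L, 0 ≤ v ∧ v < (graph.length : Int)) ∧
  (∀ l1 v l2, L = l1 ++ v :: l2 → ∀ u ∈ pvPreds graph v, u ∈ l1) ∧
  (∀ v : Int, 0 ≤ v → v < (graph.length : Int) → (∀ u ∈ pvPreds graph v, u ∈ L) → v ∈ L)

-- every element of a "supported" list satisfies any predicate closed under predecessors
theorem pvSupported_mem (graph : List (List Int)) (L : List Int)
    (hrange : ∀ v ∈ L, 0 ≤ v ∧ v < (graph.length : Int))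
    (hpre : ∀ l1 v l2, L = l1 ++ v :: l2 → ∀ u ∈ pvPreds graph v, u ∈ l1)
    (P : Int → Prop)
    (hP : ∀ v, 0 ≤ v → v < (graph.length : Int) → (∀ u ∈ pvPreds graph v, P u) → P v) :
    ∀ x ∈ L, P x := by
  have key : ∀ k : Nat, ∀ x ∈ L.take k, P x := by
    intro k
    induction k with
    | zero => simp
    | succ k ih =>
      intro x hx
      by_cases hk : k < L.length
      · rw [List.take_add_one, List.getElem?_eq_getElem hk] at hx
        rcases List.mem_append.mp hx with h | h
        · exact ih x h
        · have hxk : x = L[k] := by simpa using h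
          subst hxk
          have hsplit : L = L.take k ++ L[k] :: L.drop (k + 1) := by
            conv_lhs => rw [← List.take_append_drop k L, List.drop_eq_getElem_cons hk]
          have hpr : ∀ u ∈ pvPreds graph L[k], u ∈ L.take k := hpre _ _ _ hsplit
          have hr := hrange L[k] (List.getElem_mem hk)
          exact hP L[k] hr.1 hr.2 (fun u hu => ih u (hpr u hu))
      · rw [List.take_add_one, List.getElem?_eq_none (by omega)] at hx
        exact ih x (by simpa using hx)
  intro x hx
  exact key L.length x (by simpa using hx)

theorem pvInv_terminal (graph : List (List Int)) (indeg res : List Int)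
    (h : pvInv graph [] indeg res) : pvGood graph res := by
  obtain ⟨h1, h2, h3, h4, h5, h6⟩ := h
  refine ⟨by simpa using h1, fun v hv => h2 v (by simp [hv]), h6, ?_⟩
  intro v hv0 hv1 hsub
  have : pvRemdeg graph res v = 0 := (pvRemdeg_zero_iff graph res v).mpr hsub
  rcases (h5 v hv0 hv1).mp this with h | h
  · exact h
  · simp at h

theorem pvLoopA_good (graph : List (List Int)) (adj : PySem.Dict Int (List Int))
    (hadj : pvAdjOk graph (fun i => adj.getD i [])) :
    ∀ fuel q indeg res, pvInv graph q indeg res →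
      graph.length ≤ fuel + res.length →
      pvGood graph (pvTopoLoopA adj fuel q indeg res) := by
  intro fuel
  induction fuel with
  | zero =>
    intro q indeg res hinv hfl
    cases q with
    | nil => exact pvInv_terminal _ _ _ hinv
    | cons i t =>
      exfalso
      have := pvLenBound (res ++ i :: t) graph.length hinv.1 hinv.2.1
      simp [List.length_append] at this
      omega
  | succ f ih =>
    intro q indeg res hinv hfl
    cases q with
    | nil => exact pvInv_terminal _ _ _ hinv
    | cons i t =>
      have hstep := pvStepInv graph (fun i => adj.getD i []) hadj i t indeg res hinv
      simp only [pvTopoLoopA]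
      exact ih _ _ _ hstep (by simp only [List.length_append, List.length_cons]; omega)

theorem pvDictInner (us : List Int) (d : PySem.Dict Int (List Int)) (m : Int) (c : Int) :
    ((us.foldl (fun d u => d.modify u [] (fun l => l ++ [m])) d).getD c [])
      = d.getD c [] ++ List.replicate (us.count c) m := by
  induction us generalizing d with
  | nil => simp
  | cons u rest ih =>
    rw [List.foldl_cons, ih, List.count_cons, PySem.Dict.getD_modify]
    by_cases hc : u = c
    · rw [if_pos hc.symm, if_pos (beq_iff_eq.mpr hc), hc, List.append_assoc]
      simp [List.replicate_succ]
    · rw [if_neg (fun h => hc h.symm), if_neg (by simpa using hc)]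
      simp

theorem pvIncInner (us ind : List Int) (v : Int) (h0 : 0 ≤ v) (hv : v.toNat < ind.length) :
    us.foldl (fun ind (_ : Int) =>
        PySem.List.pySetD ind v (PySem.List.pyGetD ind v 0 + 1)) ind
      = ind.set v.toNat (ind.getD v.toNat 0 + us.length) := by
  induction us generalizing ind with
  | nil =>
    rw [List.foldl_nil, show ind.getD v.toNat 0 + (([] : List Int).length : Int)
        = ind[v.toNat] from by rw [List.getD_eq_getElem _ _ hv]; simp]
    rw [List.set_getElem_self]
  | cons u rest ih =>
    rw [List.foldl_cons, PySem.List.pySetD_of_nonneg _ _ h0, PySem.List.pyGetD_of_nonneg _ _ h0,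
      ih _ (by simpa using hv), List.set_set]
    congr 1
    rw [List.getD_eq_getElem _ _ (by rw [List.length_set]; omega), List.getElem_set_self]
    push_cast [List.length_cons]
    ring

theorem pvDictBuild (graph : List (List Int)) (m : Nat) :
    ∀ c k : Int,
      (((PySem.List.pyRange 0 (m : Int) 1).foldl
          (fun d v => (PySem.List.pyGetD graph v []).foldl
            (fun d u => d.modify u [] (fun l => l ++ [v])) d)
          PySem.Dict.empty).getD c []).count k
        = if 0 ≤ k ∧ k < (m : Int) then (pvPreds graph k).count c else 0 := by
  induction m with
  | zero =>
    intro c k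
    rw [PySem.List.pyRange_one_eq_nil (by omega)]
    simp
  | succ m ih =>
    intro c k
    rw [show ((m + 1 : Nat) : Int) = (m : Int) + 1 by push_cast; ring,
      PySem.List.pyRange_one_succ_right (by omega), List.foldl_append, List.foldl_cons,
      List.foldl_nil, pvDictInner, List.count_append, ih c k, List.count_replicate]
    have hpp : PySem.List.pyGetD graph (m : Int) [] = pvPreds graph (m : Int) := by
      rw [PySem.List.pyGetD_of_nonneg _ _ (by omega)]
      simp [pvPreds]
    rw [hpp]
    simp only [beq_iff_eq]
    by_cases hk : k = (m : Int)
    · subst hk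
      split_ifs <;> omega
    · rw [if_neg (show ¬((m : Int) = k) from fun h => hk h.symm)]
      split_ifs <;> omega

theorem pvIndegBuild (graph : List (List Int)) (m : Nat) (hm : m ≤ graph.length) :
    ((PySem.List.pyRange 0 (m : Int) 1).foldl
        (fun ind v => (PySem.List.pyGetD graph v []).foldl
          (fun ind (_ : Int) => PySem.List.pySetD ind v (PySem.List.pyGetD ind v 0 + 1)) ind)
        (List.replicate graph.length (0 : Int))).length = graph.length ∧
    (∀ k : Nat, k < graph.length →
      ((PySem.List.pyRange 0 (m : Int) 1).foldl
        (fun ind v => (PySem.List.pyGetD graph v []).foldl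
          (fun ind (_ : Int) => PySem.List.pySetD ind v (PySem.List.pyGetD ind v 0 + 1)) ind)
        (List.replicate graph.length (0 : Int))).getD k 0
        = if (k : Int) < (m : Int) then ((pvPreds graph (k : Int)).length : Int) else 0) := by
  induction m with
  | zero =>
    rw [PySem.List.pyRange_one_eq_nil (by omega)]
    refine ⟨by simp, fun k hk => ?_⟩
    rw [if_neg (by omega)]
    simp
  | succ m ih =>
    obtain ⟨IH1, IH2⟩ := ih (by omega)
    rw [show ((m + 1 : Nat) : Int) = (m : Int) + 1 by push_cast; ring,
      PySem.List.pyRange_one_succ_right (by omega), List.foldl_append, List.foldl_cons,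
      List.foldl_nil, pvIncInner _ _ _ (by omega) (by rw [IH1]; omega), Int.toNat_natCast]
    have hpp : PySem.List.pyGetD graph (m : Int) [] = pvPreds graph (m : Int) := by
      rw [PySem.List.pyGetD_of_nonneg _ _ (by omega)]
      simp [pvPreds]
    constructor
    · rw [List.length_set, IH1]
    · intro k hk
      by_cases hkm : k = m
      · subst hkm
        rw [List.getD_eq_getElem _ _ (by rw [List.length_set, IH1]; omega),
          List.getElem_set_self, IH2 _ (by omega), hpp, if_neg (by omega), if_pos (by omega)]
        simp
      · rw [List.getD_eq_getElem _ _ (by rw [List.length_set, IH1]; omega),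
          List.getElem_set_ne (by omega), ← List.getD_eq_getElem _ 0 (by rw [IH1]; omega),
          IH2 k hk]
        split_ifs <;> omega

theorem pvRemdeg_nil (graph : List (List Int)) (v : Int) :
    pvRemdeg graph [] v = ((pvPreds graph v).length : Int) := by
  unfold pvRemdeg
  simp

theorem pvInv_init (graph : List (List Int)) (indeg : List Int)
    (h1 : indeg.length = graph.length)
    (h2 : ∀ k : Nat, k < graph.length → indeg.getD k 0 = ((pvPreds graph (k : Int)).length : Int)) :
    pvInv graph
      ((PySem.List.pyRange 0 (graph.length : Int) 1).foldl
        (fun q i => if PySem.List.pyGetD indeg i 0 = 0 then q ++ [i] else q) [])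
      indeg [] := by
  rw [PySem.List.foldl_append_ite_eq_filter]
  rw [List.nil_append]
  have hmemf : ∀ v : Int,
      v ∈ (PySem.List.pyRange 0 (graph.length : Int) 1).filter
          (fun x => decide (PySem.List.pyGetD indeg x 0 = 0))
        ↔ (0 ≤ v ∧ v < (graph.length : Int)) ∧ PySem.List.pyGetD indeg v 0 = 0 := by
    intro v
    rw [List.mem_filter]
    simp only [decide_eq_true_eq]
    rw [PySem.List.mem_pyRange_one]
  refine ⟨?_, ?_, h1, ?_, ?_, ?_⟩
  · rw [List.nil_append]
    exact (PySem.List.nodup_pyRange_one 0 (graph.length : Int)).filter _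
  · intro v hv
    rw [List.nil_append] at hv
    exact ((hmemf v).mp hv).1
  · intro k hk
    rw [h2 k hk, pvRemdeg_nil]
  · intro v h0 hn
    rw [pvRemdeg_nil, hmemf v]
    have hget : PySem.List.pyGetD indeg v 0 = ((pvPreds graph v).length : Int) := by
      rw [PySem.List.pyGetD_of_nonneg _ _ h0]
      have := h2 v.toNat (by omega)
      rwa [Int.toNat_of_nonneg h0] at this
    rw [hget]
    constructor
    · intro hz
      right
      exact ⟨⟨h0, hn⟩, by omega⟩
    · rintro (h | ⟨-, h⟩)
      · simp at h
      · omega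
  · intro l1 v l2 h
    exact absurd h (by simp)

theorem pvA_good (graph : List (List Int)) :
    ∃ L, find_uncyclic_vertices_topo graph = PySem.List.sorted L (fun x => x) false
      ∧ pvGood graph L := by
  have hsplit :
      (PySem.List.pyRange 0 (graph.length : Int) 1).foldl
        (fun st v =>
          (PySem.List.pyGetD graph v []).foldl
            (fun (st : PySem.Dict Int (List Int) × List Int) u =>
              (st.1.modify u [] (fun l => l ++ [v]),
               PySem.List.pySetD st.2 v (PySem.List.pyGetD st.2 v 0 + 1)))
            st)
        (PySem.Dict.empty, List.replicate graph.length (0 : Int))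
      = ((PySem.List.pyRange 0 (graph.length : Int) 1).foldl
          (fun d v => (PySem.List.pyGetD graph v []).foldl
            (fun d u => d.modify u [] (fun l => l ++ [v])) d)
          PySem.Dict.empty,
         (PySem.List.pyRange 0 (graph.length : Int) 1).foldl
          (fun ind v => (PySem.List.pyGetD graph v []).foldl
            (fun ind (_ : Int) => PySem.List.pySetD ind v (PySem.List.pyGetD ind v 0 + 1)) ind)
          (List.replicate graph.length (0 : Int))) := by
    have hbody : (fun (st : PySem.Dict Int (List Int) × List Int) v =>
        (PySem.List.pyGetD graph v []).foldl
          (fun (st : PySem.Dict Int (List Int) × List Int) u =>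
            (st.1.modify u [] (fun l => l ++ [v]),
             PySem.List.pySetD st.2 v (PySem.List.pyGetD st.2 v 0 + 1)))
          st)
        = (fun (st : PySem.Dict Int (List Int) × List Int) v =>
            ((PySem.List.pyGetD graph v []).foldl
              (fun d u => d.modify u [] (fun l => l ++ [v])) st.1,
             (PySem.List.pyGetD graph v []).foldl
              (fun ind (_ : Int) => PySem.List.pySetD ind v (PySem.List.pyGetD ind v 0 + 1)) st.2)) := by
      funext st v
      obtain ⟨d, ind⟩ := st
      exact PySem.List.foldl_prod_mk
        (fun d (u : Int) => d.modify u [] (fun l => l ++ [v]))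
        (fun ind (_ : Int) => PySem.List.pySetD ind v (PySem.List.pyGetD ind v 0 + 1))
        (PySem.List.pyGetD graph v []) d ind
    rw [hbody]
    exact PySem.List.foldl_prod_mk
      (fun d (v : Int) => (PySem.List.pyGetD graph v []).foldl
        (fun d u => d.modify u [] (fun l => l ++ [v])) d)
      (fun ind (v : Int) => (PySem.List.pyGetD graph v []).foldl
        (fun ind (_ : Int) => PySem.List.pySetD ind v (PySem.List.pyGetD ind v 0 + 1)) ind)
      (PySem.List.pyRange 0 (graph.length : Int) 1) PySem.Dict.empty
      (List.replicate graph.length (0 : Int))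
  obtain ⟨I1, I2⟩ := pvIndegBuild graph graph.length (le_refl _)
  refine ⟨pvTopoLoopA
      ((PySem.List.pyRange 0 (graph.length : Int) 1).foldl
          (fun d v => (PySem.List.pyGetD graph v []).foldl
            (fun d u => d.modify u [] (fun l => l ++ [v])) d)
          PySem.Dict.empty)
      graph.length
      ((PySem.List.pyRange 0 (graph.length : Int) 1).foldl
        (fun q i => if PySem.List.pyGetD
            ((PySem.List.pyRange 0 (graph.length : Int) 1).foldl
              (fun ind v => (PySem.List.pyGetD graph v []).foldl
                (fun ind (_ : Int) => PySem.List.pySetD ind v (PySem.List.pyGetD ind v 0 + 1)) ind)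
              (List.replicate graph.length (0 : Int))) i 0 = 0 then q ++ [i] else q) [])
      ((PySem.List.pyRange 0 (graph.length : Int) 1).foldl
        (fun ind v => (PySem.List.pyGetD graph v []).foldl
          (fun ind (_ : Int) => PySem.List.pySetD ind v (PySem.List.pyGetD ind v 0 + 1)) ind)
        (List.replicate graph.length (0 : Int)))
      [], by simp only [find_uncyclic_vertices_topo]; rw [hsplit], ?_⟩
  have hadj : pvAdjOk graph (fun i =>
      ((PySem.List.pyRange 0 (graph.length : Int) 1).foldl
          (fun d v => (PySem.List.pyGetD graph v []).foldl
            (fun d u => d.modify u [] (fun l => l ++ [v])) d)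
          PySem.Dict.empty).getD i []) := by
    intro i hi0 hi1
    constructor
    · intro a ha
      have hc := pvDictBuild graph graph.length i a
      have : 0 < (((PySem.List.pyRange 0 (graph.length : Int) 1).foldl
          (fun d v => (PySem.List.pyGetD graph v []).foldl
            (fun d u => d.modify u [] (fun l => l ++ [v])) d)
          PySem.Dict.empty).getD i []).count a := List.count_pos_iff.mpr ha
      by_cases hb : 0 ≤ a ∧ a < (graph.length : Int)
      · exact hb
      · rw [if_neg hb] at hc
        omega
    · intro k hk0 hk1
      have hc := pvDictBuild graph graph.length i k
      rw [if_pos ⟨hk0, hk1⟩] at hc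
      exact_mod_cast congrArg (Nat.cast : Nat → Int) hc
  exact pvLoopA_good graph _ hadj graph.length _ _ []
    (pvInv_init graph _ I1 (fun k hk => by rw [I2 k hk, if_pos (by omega)]))
    (by simp)

-- ===== B-side lemmas =====

theorem pvCountFalse_set (s : List Bool) (k : Nat) (hk : k < s.length)
    (hf : s.getD k false = false) :
    (s.set k true).count false + 1 = s.count false := by
  induction s generalizing k with
  | nil => simp at hk
  | cons a t ih =>
    cases k with
    | zero =>
      simp only [List.getD_cons_zero] at hf
      subst hf
      simp
    | succ k =>
      simp only [List.getD_cons_succ] at hf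
      have := ih k (by simpa using hk) hf
      simp only [List.set_cons_succ, List.count_cons]
      omega

theorem pvSweepFlag (graph : List (List Int)) (n : Int) :
    ∀ (l : List Int) (s : List Bool), (l.foldl (pvStepB graph n) (s, true)).2 = true := by
  intro l
  induction l with
  | nil => intro s; rfl
  | cons a t ih =>
    intro s
    rw [List.foldl_cons]
    by_cases h : pvCondB graph n s a
    · rw [show pvStepB graph n (s, true) a = (PySem.List.pySetD s a true, true) from by
        simp [pvStepB, h]]
      exact ih _
    · rw [show pvStepB graph n (s, true) a = (s, true) from by simp [pvStepB, h]]
      exact ih _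

theorem pvSweepNoChange (graph : List (List Int)) (n : Int) :
    ∀ (l : List Int) (s : List Bool), (l.foldl (pvStepB graph n) (s, false)).2 = false →
      (l.foldl (pvStepB graph n) (s, false)).1 = s ∧ ∀ v ∈ l, pvCondB graph n s v = false := by
  intro l
  induction l with
  | nil => intro s _; exact ⟨rfl, by simp⟩
  | cons a t ih =>
    intro s hfin
    rw [List.foldl_cons] at hfin ⊢
    by_cases h : pvCondB graph n s a
    · exfalso
      rw [show pvStepB graph n (s, false) a = (PySem.List.pySetD s a true, true) from by
        simp [pvStepB, h]] at hfin
      rw [pvSweepFlag graph n t _] at hfin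
      exact absurd hfin (by simp)
    · rw [show pvStepB graph n (s, false) a = (s, false) from by simp [pvStepB, h]] at hfin ⊢
      obtain ⟨h1, h2⟩ := ih s hfin
      refine ⟨h1, fun v hv => ?_⟩
      rcases List.mem_cons.mp hv with h' | h'
      · subst h'; exact Bool.eq_false_iff.mpr h
      · exact h2 v h'

theorem pvSweepFold (graph : List (List Int)) :
    ∀ (l : List Int) (s : List Bool) (b : Bool),
      (∀ v ∈ l, 0 ≤ v ∧ v < (graph.length : Int)) → s.length = graph.length →
      ((l.foldl (pvStepB graph (graph.length : Int)) (s, b)).1.length = graph.length) ∧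
      ((l.foldl (pvStepB graph (graph.length : Int)) (s, b)).1.count false ≤ s.count false) ∧
      ((l.foldl (pvStepB graph (graph.length : Int)) (s, b)).2 = true → b = false →
        (l.foldl (pvStepB graph (graph.length : Int)) (s, b)).1.count false < s.count false) := by
  intro l
  induction l with
  | nil =>
    intro s b _ hlen
    refine ⟨hlen, le_refl _, fun h1 h2 => ?_⟩
    exfalso; subst h2; exact absurd h1 (by simp)
  | cons a t ih =>
    intro s b hr hlen
    obtain ⟨ha0, ha1⟩ := hr a List.mem_cons_self
    rw [List.foldl_cons]
    by_cases h : pvCondB graph (graph.length : Int) s a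
    · have hstep : pvStepB graph (graph.length : Int) (s, b) a
          = (PySem.List.pySetD s a true, true) := by simp [pvStepB, h]
      rw [hstep]
      have hset : PySem.List.pySetD s a true = s.set a.toNat true :=
        PySem.List.pySetD_of_nonneg _ _ ha0
      have hatl : a.toNat < s.length := by omega
      have hgf : s.getD a.toNat false = false := by
        have := h
        unfold pvCondB at this
        have h1 : PySem.List.pyGetD s a false = false := by
          rcases Bool.and_eq_true_iff.mp this with ⟨hh, -⟩
          simpa using hh
        rwa [PySem.List.pyGetD_of_nonneg _ _ ha0] at h1
      have hcnt : (s.set a.toNat true).count false + 1 = s.count false :=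
        pvCountFalse_set s a.toNat hatl hgf
      have hlen' : (PySem.List.pySetD s a true).length = graph.length := by
        rw [hset, List.length_set]; exact hlen
      obtain ⟨IH1, IH2, -⟩ := ih (PySem.List.pySetD s a true) true
        (fun v hv => hr v (List.mem_cons_of_mem _ hv)) hlen'
      have hcnt2 : (PySem.List.pySetD s a true).count false + 1 = s.count false := by
        rw [hset]; exact hcnt
      refine ⟨IH1, ?_, fun _ _ => ?_⟩
      · omega
      · omega
    · have hstep : pvStepB graph (graph.length : Int) (s, b) a = (s, b) := by
        simp [pvStepB, h]
      rw [hstep]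
      exact ih s b (fun v hv => hr v (List.mem_cons_of_mem _ hv)) hlen

theorem pvFixLoop_fix (graph : List (List Int)) :
    ∀ (fuel : Nat) (s : List Bool), s.length = graph.length → s.count false < fuel →
      (pvFixLoop graph (graph.length : Int) fuel s).length = graph.length ∧
      pvSweepB graph (graph.length : Int) (pvFixLoop graph (graph.length : Int) fuel s)
        = (pvFixLoop graph (graph.length : Int) fuel s, false) := by
  intro fuel
  induction fuel with
  | zero => intro s _ h; omega
  | succ f ih =>
    intro s hlen hcnt
    have hr : ∀ v ∈ PySem.List.pyRange 0 (graph.length : Int) 1,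
        0 ≤ v ∧ v < (graph.length : Int) := by
      intro v hv
      exact (PySem.List.mem_pyRange_one).mp hv
    obtain ⟨S1, S2, S3⟩ := pvSweepFold graph (PySem.List.pyRange 0 (graph.length : Int) 1) s false hr hlen
    by_cases hch : (pvSweepB graph (graph.length : Int) s).2 = true
    · have hstep : pvFixLoop graph (graph.length : Int) (f + 1) s
          = pvFixLoop graph (graph.length : Int) f (pvSweepB graph (graph.length : Int) s).1 := by
        simp only [pvFixLoop, hch, if_true]
      rw [hstep]
      have hlt : (pvSweepB graph (graph.length : Int) s).1.count false < s.count false :=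
        S3 hch rfl
      exact ih _ S1 (by omega)
    · have hch' : (pvSweepB graph (graph.length : Int) s).2 = false :=
        Bool.eq_false_iff.mpr hch
      have hstep : pvFixLoop graph (graph.length : Int) (f + 1) s
          = (pvSweepB graph (graph.length : Int) s).1 := by
        simp only [pvFixLoop, hch', Bool.false_eq_true, if_false]
      obtain ⟨hfst, -⟩ := pvSweepNoChange graph (graph.length : Int)
        (PySem.List.pyRange 0 (graph.length : Int) 1) s hch'
      have hfst' : (pvSweepB graph (graph.length : Int) s).1 = s := hfst
      rw [hstep, hfst']
      exact ⟨hlen, Prod.ext hfst' hch'⟩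

-- every vertex marked during the sweeps lies in any pvGood set (soundness of marking)
theorem pvSweepSub (graph : List (List Int)) (LA : List Int) (hGA : pvGood graph LA) :
    ∀ (l : List Int) (s : List Bool) (b : Bool),
      (∀ v ∈ l, 0 ≤ v ∧ v < (graph.length : Int)) → s.length = graph.length →
      (∀ k : Nat, k < graph.length → s.getD k false = true → ((k : Int) ∈ LA)) →
      ∀ k : Nat, k < graph.length →
        ((l.foldl (pvStepB graph (graph.length : Int)) (s, b)).1.getD k false = true) →
        (k : Int) ∈ LA := by
  intro l
  induction l with
  | nil => intro s b _ _ hsub k hk h; exact hsub k hk h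
  | cons a t ih =>
    intro s b hr hlen hsub
    obtain ⟨ha0, ha1⟩ := hr a List.mem_cons_self
    rw [List.foldl_cons]
    by_cases h : pvCondB graph (graph.length : Int) s a
    · have hstep : pvStepB graph (graph.length : Int) (s, b) a
          = (PySem.List.pySetD s a true, true) := by simp [pvStepB, h]
      rw [hstep]
      have hset : PySem.List.pySetD s a true = s.set a.toNat true :=
        PySem.List.pySetD_of_nonneg _ _ ha0
      have hatl : a.toNat < s.length := by omega
      -- a itself is in LA: all its predecessors are marked, hence in LA; use closure
      have haLA : a ∈ LA := by
        unfold pvCondB at h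
        rcases Bool.and_eq_true_iff.mp h with ⟨-, hall⟩
        rw [List.all_eq_true] at hall
        have hpp : PySem.List.pyGetD graph a [] = pvPreds graph a := by
          rw [PySem.List.pyGetD_of_nonneg _ _ ha0]; rfl
        refine hGA.2.2.2 a ha0 ha1 ?_
        intro u hu
        have := hall u (by rwa [hpp])
        rcases Bool.and_eq_true_iff.mp this with ⟨hdec, hmk⟩
        have hur : 0 ≤ u ∧ u < (graph.length : Int) := by simpa using hdec
        have hgs : s.getD u.toNat false = true := by
          rwa [PySem.List.pyGetD_of_nonneg _ _ hur.1] at hmk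
        have := hsub u.toNat (by omega) hgs
        rwa [Int.toNat_of_nonneg hur.1] at this
      have hsub' : ∀ k : Nat, k < graph.length →
          (PySem.List.pySetD s a true).getD k false = true → ((k : Int) ∈ LA) := by
        intro k hk hget
        rw [hset] at hget
        by_cases hka : k = a.toNat
        · subst hka
          have : ((a.toNat : Nat) : Int) = a := by omega
          rwa [this]
        · rw [List.getD_eq_getElem _ _ (by rw [List.length_set]; omega),
            List.getElem_set_ne (by omega),
            ← List.getD_eq_getElem s false (by omega)] at hget
          exact hsub k hk hget
      exact ih _ true (fun v hv => hr v (List.mem_cons_of_mem _ hv))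
        (by rw [hset, List.length_set]; exact hlen) hsub'
    · have hstep : pvStepB graph (graph.length : Int) (s, b) a = (s, b) := by
        simp [pvStepB, h]
      rw [hstep]
      exact ih s b (fun v hv => hr v (List.mem_cons_of_mem _ hv)) hlen hsub

-- ===== VERDICT (by name: the statement is the Claim_ definition above) =====
theorem find_uncyclic_vertices_topo_spec : Claim_equal_find_uncyclic_vertices_topo := by
  intro graph _
  obtain ⟨LA, hA, hGA⟩ := pvA_good graph
  show _ = _
  rw [hA]
  simp only [find_uncyclic_vertices_topo_alt]
  rw [PySem.List.foldl_append_if_eq_filter, List.nil_append]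
  -- okF : the fixed point reached by the sweeps
  have hrepl : (List.replicate graph.length false).count false = graph.length := by
    simp
  obtain ⟨hlenF, hfixF⟩ := pvFixLoop_fix graph (graph.length + 1)
    (List.replicate graph.length false) (by simp) (by omega)
  -- membership of the filtered range ↔ membership of LA
  have hmem : ∀ x : Int,
      (x ∈ (PySem.List.pyRange 0 (graph.length : Int) 1).filter
        (fun v => PySem.List.pyGetD
          (pvFixLoop graph (graph.length : Int) (graph.length + 1)
            (List.replicate graph.length false)) v false)) ↔ x ∈ LA := by
    intro x
    rw [List.mem_filter, PySem.List.mem_pyRange_one]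
    constructor
    · rintro ⟨⟨hx0, hx1⟩, hget⟩
      have hget' : (pvFixLoop graph (graph.length : Int) (graph.length + 1)
          (List.replicate graph.length false)).getD x.toNat false = true := by
        rwa [PySem.List.pyGetD_of_nonneg _ _ hx0] at hget
      have := pvSweepSub graph LA hGA
        (PySem.List.pyRange 0 (graph.length : Int) 1)
        (List.replicate graph.length false) false
        (fun v hv => (PySem.List.mem_pyRange_one).mp hv) (by simp)
        (fun k hk h => by simp [hk] at h)
      -- pvSweepSub speaks about one sweep; instead go through the loop by induction:
      -- prove the "marked ⊆ LA" invariant for pvFixLoop directly here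
      clear this
      have hloop : ∀ (fuel : Nat) (s : List Bool), s.length = graph.length →
          (∀ k : Nat, k < graph.length → s.getD k false = true → ((k : Int) ∈ LA)) →
          ∀ k : Nat, k < graph.length →
            (pvFixLoop graph (graph.length : Int) fuel s).getD k false = true →
            (k : Int) ∈ LA := by
        intro fuel
        induction fuel with
        | zero => intro s _ hsub k hk h; exact hsub k hk h
        | succ f ih =>
          intro s hlen hsub k hk h
          have hr : ∀ v ∈ PySem.List.pyRange 0 (graph.length : Int) 1,
              0 ≤ v ∧ v < (graph.length : Int) :=
            fun v hv => (PySem.List.mem_pyRange_one).mp hv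
          obtain ⟨S1, -, -⟩ := pvSweepFold graph
            (PySem.List.pyRange 0 (graph.length : Int) 1) s false hr hlen
          have hsub' := pvSweepSub graph LA hGA
            (PySem.List.pyRange 0 (graph.length : Int) 1) s false hr hlen hsub
          by_cases hch : (pvSweepB graph (graph.length : Int) s).2 = true
          · rw [show pvFixLoop graph (graph.length : Int) (f + 1) s
                = pvFixLoop graph (graph.length : Int) f
                    (pvSweepB graph (graph.length : Int) s).1 from by
                simp only [pvFixLoop, hch, if_true]] at h
            exact ih (pvSweepB graph (graph.length : Int) s).1 S1
              (fun k hk h => hsub' k hk h) k hk h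
          · have hch' : (pvSweepB graph (graph.length : Int) s).2 = false :=
              Bool.eq_false_iff.mpr hch
            rw [show pvFixLoop graph (graph.length : Int) (f + 1) s
                = (pvSweepB graph (graph.length : Int) s).1 from by
                simp only [pvFixLoop, hch', Bool.false_eq_true, if_false]] at h
            exact hsub' k hk h
      have := hloop (graph.length + 1) (List.replicate graph.length false) (by simp)
        (fun k hk h => by simp [hk] at h) x.toNat (by omega) hget'
      rwa [Int.toNat_of_nonneg hx0] at this
    · intro hx
      -- completeness: LA ⊆ marked set, via closedness of the fixed point
      obtain ⟨-, hfix2⟩ := pvSweepNoChange graph (graph.length : Int)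
        (PySem.List.pyRange 0 (graph.length : Int) 1)
        (pvFixLoop graph (graph.length : Int) (graph.length + 1)
          (List.replicate graph.length false))
        (by rw [show (PySem.List.pyRange 0 (graph.length : Int) 1).foldl
              (pvStepB graph (graph.length : Int))
              (pvFixLoop graph (graph.length : Int) (graph.length + 1)
                (List.replicate graph.length false), false)
            = pvSweepB graph (graph.length : Int)
                (pvFixLoop graph (graph.length : Int) (graph.length + 1)
                  (List.replicate graph.length false)) from rfl, hfixF])
      have hP := pvSupported_mem graph LA hGA.2.1 hGA.2.2.1
        (fun v => 0 ≤ v ∧ v < (graph.length : Int) ∧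
          PySem.List.pyGetD (pvFixLoop graph (graph.length : Int) (graph.length + 1)
            (List.replicate graph.length false)) v false = true)
        (fun v hv0 hv1 hprev => by
          refine ⟨hv0, hv1, ?_⟩
          have hvr : v ∈ PySem.List.pyRange 0 (graph.length : Int) 1 :=
            (PySem.List.mem_pyRange_one).mpr ⟨hv0, hv1⟩
          have hc := hfix2 v hvr
          unfold pvCondB at hc
          rcases Bool.and_eq_false_iff.mp hc with h1 | h2
          · simpa using h1
          · exfalso
            have hpp : PySem.List.pyGetD graph v [] = pvPreds graph v := by
              rw [PySem.List.pyGetD_of_nonneg _ _ hv0]; rfl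
            rcases List.all_eq_false.mp h2 with ⟨u, hu, hguard⟩
            rw [hpp] at hu
            obtain ⟨hu0, hu1, humk⟩ := hprev u hu
            rw [Bool.and_eq_true, decide_eq_true_eq] at hguard
            exact hguard ⟨⟨hu0, hu1⟩, humk⟩)
      obtain ⟨hx0, hx1, hmk⟩ := hP x hx
      exact ⟨⟨hx0, hx1⟩, hmk⟩
  -- the filtered range is strictly increasing and nodup; apply the sorted-characterisation
  have hpair : ((PySem.List.pyRange 0 (graph.length : Int) 1).filter
      (fun v => PySem.List.pyGetD
        (pvFixLoop graph (graph.length : Int) (graph.length + 1)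
          (List.replicate graph.length false)) v false)).Pairwise
      (fun a b => (fun x : Int => x) a < (fun x : Int => x) b) :=
    (PySem.List.pairwise_lt_pyRange_one 0 (graph.length : Int)).sublist
      List.filter_sublist
  have hnd : ((PySem.List.pyRange 0 (graph.length : Int) 1).filter
      (fun v => PySem.List.pyGetD
        (pvFixLoop graph (graph.length : Int) (graph.length + 1)
          (List.replicate graph.length false)) v false)).Nodup :=
    (PySem.List.nodup_pyRange_one 0 (graph.length : Int)).filter _
  have hperm : ((PySem.List.pyRange 0 (graph.length : Int) 1).filter
      (fun v => PySem.List.pyGetD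
        (pvFixLoop graph (graph.length : Int) (graph.length + 1)
          (List.replicate graph.length false)) v false)).Perm LA :=
    (List.perm_ext_iff_of_nodup hnd hGA.1).mpr hmem
  exact PySem.List.sorted_eq_of_perm_of_pairwise_lt _ _ _ hperm hpair
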